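-- pv_equiv track=rewrite | github.com/remotesensinginfo/arcsi | arcsilib/arcsiutils.py | findMaximumElev
-- ===== SOURCE A (Python) =====
-- def findMaximumElev(elev):
--     elevVal = -500
--     outElev = 0
--     for i in range(90):
--         if (elev > elevVal) & (elev < (elevVal+100)):
--             outElev = elevVal + 100
--             break
--         elevVal = elevVal + 100
--     return outElev
-- ===== SOURCE B (Python) =====
-- def findMaximumElev(elev):
--     # Direct arithmetic: next 100-boundary strictly above elev, inside the open
--     # valid range (-500, 8500); 0 for exact multiples of 100 or out-of-range.
--     if -500 < elev < 8500 and elev % 100 != 0: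
--         return (elev // 100 + 1) * 100
--     return 0
-- ===== Notes on version B (the rewrite author's own statement) =====
-- stated objective: simpler
-- what changed: Replaced the 90-iteration linear scan over 100-wide intervals with a closed-form floor-division ceiling to the next 100 boundary, guarded by the range and non-multiple-of-100 conditions.
import Mathlib
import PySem

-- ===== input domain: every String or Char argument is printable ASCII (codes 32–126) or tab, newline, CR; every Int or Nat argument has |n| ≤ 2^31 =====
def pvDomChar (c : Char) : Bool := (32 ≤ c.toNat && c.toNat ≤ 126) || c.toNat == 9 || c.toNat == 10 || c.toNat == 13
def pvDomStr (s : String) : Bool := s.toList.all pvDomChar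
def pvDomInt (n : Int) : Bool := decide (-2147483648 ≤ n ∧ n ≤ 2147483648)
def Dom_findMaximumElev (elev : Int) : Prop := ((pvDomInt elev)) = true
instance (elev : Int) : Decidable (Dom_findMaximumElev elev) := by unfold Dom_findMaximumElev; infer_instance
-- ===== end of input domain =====

-- B replaces A's 90-iteration interval scan with a closed-form floor-division ceiling (simpler).


-- ===== PORT A =====
-- the for-loop with break: recursion over the range list carrying (elevVal, outElev)
def findMaximumElevLoop (elev : Int) : List Int → Int → Int → Int
  | [], _, outElev => outElev
  | _ :: rest, elevVal, outElev =>
    if elev > elevVal ∧ elev < elevVal + 100 then elevVal + 100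
    else findMaximumElevLoop elev rest (elevVal + 100) outElev

def findMaximumElev (elev : Int) : Int :=
  findMaximumElevLoop elev (PySem.List.pyRange 0 90 1) (-500) 0

-- ===== PORT B =====
def findMaximumElev_alt (elev : Int) : Int :=
  if -500 < elev ∧ elev < 8500 ∧ PySem.Int.mod elev 100 ≠ 0 then
    (PySem.Int.floordiv elev 100 + 1) * 100
  else 0

-- ===== PRECONDITION & SPEC =====
def Spec_findMaximumElev (elev : Int) (out : Int) : Prop := out = findMaximumElev_alt elev
instance (elev : Int) (out : Int) : Decidable (Spec_findMaximumElev elev out) := by unfold Spec_findMaximumElev; infer_instance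

-- ===== CLAIM (what is proved, stated in full; the proofs are below) =====
def Claim_equal_findMaximumElev : Prop := ∀ (elev : Int), Dom_findMaximumElev elev → Spec_findMaximumElev elev (findMaximumElev elev)

-- ===== LEMMAS AND PROOFS =====

-- closed form of A's loop, by induction on the remaining iterations
theorem findMaximumElevLoop_closed (elev : Int) (l : List Int) (ev : Int) :
    findMaximumElevLoop elev l ev 0 =
      if ev < elev ∧ elev < ev + 100 * l.length ∧ (elev - ev) % 100 ≠ 0 then
        100 * ((elev - ev) / 100) + ev + 100
      else 0 := by
  induction l generalizing ev with
  | nil =>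
    simp only [findMaximumElevLoop, List.length_nil, Nat.cast_zero, mul_zero, add_zero]
    split <;> omega
  | cons x rest ih =>
    simp only [findMaximumElevLoop, List.length_cons]
    by_cases h : elev > ev ∧ elev < ev + 100
    · rw [if_pos h]
      have hfd : (elev - ev) / 100 = 0 := by omega
      rw [if_pos]
      · rw [hfd]; ring
      · refine ⟨h.1, by push_cast; omega, ?_⟩
        omega
    · rw [if_neg h, ih]
      by_cases h1 : (ev + 100) < elev ∧ elev < (ev + 100) + 100 * rest.length ∧ (elev - (ev + 100)) % 100 ≠ 0
      · rw [if_pos h1, if_pos]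
        · have : (elev - ev) / 100 = (elev - (ev + 100)) / 100 + 1 := by omega
          rw [this]; ring
        · push_cast
          constructor
          · omega
          constructor
          · omega
          · omega
      · rw [if_neg h1, if_neg]
        intro ⟨ha, hb, hc⟩
        push_cast at hb h1
        apply h1
        refine ⟨?_, ?_, ?_⟩ <;> omega

theorem findMaximumElev_eq_alt (elev : Int) :
    findMaximumElev elev = findMaximumElev_alt elev := by
  have hlen : (PySem.List.pyRange 0 90 1).length = 90 := by decide
  rw [findMaximumElev, findMaximumElevLoop_closed, hlen, findMaximumElev_alt]
  have hmod : PySem.Int.mod elev 100 = elev % 100 :=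
    PySem.Int.mod_eq_emod_of_pos (by norm_num)
  have hfd : PySem.Int.floordiv elev 100 = elev / 100 :=
    PySem.Int.floordiv_eq_ediv_of_pos (by norm_num)
  rw [hmod, hfd]
  by_cases h : -500 < elev ∧ elev < 8500 ∧ elev % 100 ≠ 0
  · rw [if_pos h, if_pos]
    · have : (elev - -500) / 100 = elev / 100 + 5 := by omega
      rw [this]; ring
    · refine ⟨by omega, by push_cast; omega, by omega⟩
  · rw [if_neg h, if_neg]
    intro ⟨ha, hb, hc⟩
    push_cast at hb
    exact h ⟨by omega, by omega, by omega⟩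

-- ===== VERDICT (by name: the statement is the Claim_ definition above) =====
theorem findMaximumElev_spec : Claim_equal_findMaximumElev := by
  intro elev _
  exact (findMaximumElev_eq_alt elev).symm ▸ rfl
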